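-- pv_equiv track=rewrite | github.com/il3241ya/CryptoStega | Vigener/vizhiner.py | gamma_forming_decrypt
-- ===== SOURCE A (Python) =====
-- def gamma_forming_decrypt(close_text: str, key: str, encryption_type: int) -> str:
--     """
--     Generate a gamma string for decryption based on the encryption type.
--
--     Args:
--         close_text (str): The input text to be decrypted.
--         key (str): The decryption key.
--         encryption_type (int): The type of encryption to be applied.
--
--     Returns:
--         str: The generated gamma string for decryption.
--     """
--
--     match encryption_type:
--         case 1:
--             return key * (len(close_text) // len(key) + 1 * int(bool(len(close_text) % len(key))))
--         case 2:
--             for i in range(len(close_text) - 1):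
--                 key += chr(97 + (ord(close_text[i]) - ord(key[i])) % 26)
--             return key
--         case 3:
--             for i in range(len(close_text) - 1):
--                 open_sym = chr(((ord(close_text[i]) - 97) - (ord(key[i]) - 97)) % 26 + 97)
--                 key += chr((ord(key[i]) - 97 + ord(open_sym) - 97) % 26 + 97)
--             return key
-- ===== SOURCE B (Python) =====
-- def gamma_forming_decrypt(close_text: str, key: str, encryption_type: int) -> str:
--     if encryption_type == 1:
--         # single ceiling division instead of floor-division plus remainder test
--         return key * ((len(close_text) + len(key) - 1) // len(key))
--     if encryption_type == 2:
--         # column-major fill: the autokey stream splits into len(key) independent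
--         # stride-K chains (position j+K depends only on position j), so fill a
--         # preallocated buffer chain by chain instead of appending to a growing
--         # string that indexes back into itself
--         n = len(close_text) - 1
--         K = len(key)
--         out = list(key) + ['\x00'] * n
--         for r in range(K):
--             j = r
--             while j < n:
--                 out[j + K] = chr(97 + (ord(close_text[j]) - ord(out[j])) % 26)
--                 j += K
--         return ''.join(out)
--     if encryption_type == 3:
--         # the key terms cancel modulo 26: each appended char is an independent
--         # per-character map of close_text, no recurrence at all
--         return key + ''.join(chr((ord(c) - 97) % 26 + 97) for c in close_text[:-1])
-- ===== Notes on version B (the rewrite author's own statement) =====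
-- stated objective: alternative
-- what changed: Case 2's append-and-read-back single growing string is replaced by a column-major traversal: the autokey stream decomposes into len(key) independent stride-K chains, so B preallocates the output buffer and fills it chain by chain (a different traversal order, justified because position j+K depends only on position j); case 3's growing-key recurrence is replaced by an independent per-character map (the key terms cancel mod 26); case 1 uses one ceiling division instead of floor division plus a remainder test.
import Mathlib
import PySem

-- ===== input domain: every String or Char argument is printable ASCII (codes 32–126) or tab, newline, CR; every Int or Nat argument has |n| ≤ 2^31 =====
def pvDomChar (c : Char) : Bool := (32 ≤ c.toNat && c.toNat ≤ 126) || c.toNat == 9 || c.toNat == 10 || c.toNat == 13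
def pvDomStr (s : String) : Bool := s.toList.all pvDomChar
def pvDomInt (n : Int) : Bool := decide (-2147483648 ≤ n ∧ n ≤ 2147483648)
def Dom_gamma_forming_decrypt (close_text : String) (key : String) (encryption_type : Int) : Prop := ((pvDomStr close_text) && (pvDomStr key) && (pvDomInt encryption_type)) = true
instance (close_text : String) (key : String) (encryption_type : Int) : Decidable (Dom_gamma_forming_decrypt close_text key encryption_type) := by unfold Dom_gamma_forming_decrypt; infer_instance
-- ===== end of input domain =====

-- B fills case 2's autokey stream column-major (one independent stride-K chain per
-- key position, into a preallocated buffer) instead of appending to one growing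
-- string; case 3 becomes an independent per-character map (the key terms cancel
-- mod 26); case 1 uses a single ceiling division. Objective: alternative (no speed claim).

-- ===== PORT A =====
def gamma_forming_decrypt (close_text : String) (key : String) (encryption_type : Int) : String :=
  let ct := close_text.toList
  let k := key.toList
  if encryption_type = 1 then
    String.ofList (PySem.List.pyRepeat k (PySem.Int.floordiv (ct.length : Int) (k.length : Int)
      + 1 * (if PySem.Int.mod (ct.length : Int) (k.length : Int) ≠ 0 then 1 else 0)))
  else if encryption_type = 2 then
    String.ofList ((List.range (ct.length - 1)).foldl (fun acc (i : Nat) =>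
      match PySem.List.pyGet? ct (i : Int), PySem.List.pyGet? acc (i : Int) with
      | some c, some kc =>
          acc ++ [Char.ofNat (97 + (PySem.Int.mod ((c.toNat : Int) - (kc.toNat : Int)) 26).toNat)]
      | _, _ => acc) k)
  else if encryption_type = 3 then
    String.ofList ((List.range (ct.length - 1)).foldl (fun acc (i : Nat) =>
      match PySem.List.pyGet? ct (i : Int), PySem.List.pyGet? acc (i : Int) with
      | some c, some kc =>
          let osym := Char.ofNat ((PySem.Int.mod (((c.toNat : Int) - 97) - ((kc.toNat : Int) - 97)) 26).toNat + 97)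
          acc ++ [Char.ofNat ((PySem.Int.mod ((kc.toNat : Int) - 97 + ((osym.toNat : Int) - 97)) 26).toNat + 97)]
      | _, _ => acc) k)
  else ""

-- ===== PORT B =====
-- the case-2 character update (chr(97 + (ord(close_text[j]) - ord(out[j])) % 26))
def gfdStep (c kc : Char) : Char :=
  Char.ofNat (97 + (PySem.Int.mod ((c.toNat : Int) - (kc.toNat : Int)) 26).toNat)

-- Source B's inner `while j < n:` loop for one stride-K chain; the stride is passed as
-- kp with K = kp + 1 (so termination is structural; the fold below only runs it
-- with kp = K - 1 and K ≥ 1, i.e. stride exactly K as in Source B). Reads are always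
-- in range in Source B, so getD's default is never returned.
def gfdChain (ct : List Char) (kp n : Nat) (out : List Char) (j : Nat) : List Char :=
  if j < n then
    gfdChain ct kp n (out.set (j + (kp + 1)) (gfdStep (ct.getD j '\x00') (out.getD j '\x00'))) (j + (kp + 1))
  else out
termination_by n - j
decreasing_by omega

-- per-character map of B's case 3
def gfdChar3 (c : Char) : Char :=
  Char.ofNat ((PySem.Int.mod ((c.toNat : Int) - 97) 26).toNat + 97)

def gamma_forming_decrypt_alt (close_text : String) (key : String) (encryption_type : Int) : String :=
  let ct := close_text.toList
  let k := key.toList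
  if encryption_type = 1 then
    String.ofList (PySem.List.pyRepeat k
      (PySem.Int.floordiv ((ct.length : Int) + (k.length : Int) - 1) (k.length : Int)))
  else if encryption_type = 2 then
    -- n = len(close_text) - 1 (Nat subtraction clamps at 0, matching Python's
    -- empty `['\x00'] * -1` and never-entered chains when close_text = "")
    let n := ct.length - 1
    let K := k.length
    String.ofList ((List.range K).foldl (fun out r => gfdChain ct (K - 1) n out r)
      (k ++ List.replicate n '\x00'))
  else if encryption_type = 3 then
    String.ofList (k ++ (PySem.List.slice ct none (some (-1))).map gfdChar3)
  else ""

-- ===== PRECONDITION & SPEC =====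
-- Pre_ excludes exactly the inputs where the Python A does not return a string:
-- encryption_type outside {1,2,3} (A falls through and returns None), and an empty
-- key where A raises (ZeroDivisionError in case 1; IndexError in cases 2/3 as soon
-- as the loop runs, i.e. when len(close_text) ≥ 2).
def Pre_gamma_forming_decrypt (close_text : String) (key : String) (encryption_type : Int) : Prop :=
  (encryption_type = 1 ∨ encryption_type = 2 ∨ encryption_type = 3) ∧
  (key ≠ "" ∨ (encryption_type ≠ 1 ∧ close_text.toList.length ≤ 1))
instance (close_text : String) (key : String) (encryption_type : Int) : Decidable (Pre_gamma_forming_decrypt close_text key encryption_type) := by unfold Pre_gamma_forming_decrypt; infer_instance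

def pvWitness_gamma_forming_decrypt : String × String × Int := ("lxfopv", "kq", 2)

def Spec_gamma_forming_decrypt (close_text : String) (key : String) (encryption_type : Int) (out : String) : Prop := out = gamma_forming_decrypt_alt close_text key encryption_type
instance (close_text : String) (key : String) (encryption_type : Int) (out : String) : Decidable (Spec_gamma_forming_decrypt close_text key encryption_type out) := by unfold Spec_gamma_forming_decrypt; infer_instance

-- ===== CLAIM (what is proved, stated in full; the proofs are below) =====
def Claim_equal_gamma_forming_decrypt : Prop := ∀ (close_text : String) (key : String) (encryption_type : Int), Dom_gamma_forming_decrypt close_text key encryption_type → Pre_gamma_forming_decrypt close_text key encryption_type → Spec_gamma_forming_decrypt close_text key encryption_type (gamma_forming_decrypt close_text key encryption_type)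

-- ===== LEMMAS AND PROOFS =====

-- ceiling division in Nat: (L + K - 1) / K = L / K + [L % K ≠ 0]
lemma gfd_ceil_div (L K : Nat) (hK : 0 < K) :
    (L + K - 1) / K = L / K + (if L % K = 0 then 0 else 1) := by
  obtain ⟨q, r, rfl, hr⟩ : ∃ q r, L = K * q + r ∧ r < K :=
    ⟨L / K, L % K, (Nat.div_add_mod L K).symm, Nat.mod_lt _ hK⟩
  rw [Nat.mul_add_div hK, Nat.mul_add_mod, Nat.div_eq_of_lt hr, Nat.mod_eq_of_lt hr]
  rcases Nat.eq_zero_or_pos r with h0 | hpos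
  · subst h0
    have h1 : K * q + 0 + K - 1 = (K - 1) + K * q := by
      generalize K * q = t; omega
    rw [h1, Nat.add_mul_div_left _ _ hK, Nat.div_eq_of_lt (by omega)]
    simp
  · have h1 : K * q + r + K - 1 = (r - 1) + K * (q + 1) := by
      have h2 : K * (q + 1) = K * q + K := by ring
      rw [h2]; generalize K * q = t; omega
    rw [h1, Nat.add_mul_div_left _ _ hK, Nat.div_eq_of_lt (by omega), if_neg (by omega)]
    omega

-- the tiling counts of case 1 agree: A's  L//K + [L%K ≠ 0]  is the ceiling division  (L+K-1)//K
lemma gfd_count_eq (L K : Nat) (hK : 0 < K) :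
    PySem.Int.floordiv (L : Int) (K : Int)
      + 1 * (if PySem.Int.mod (L : Int) (K : Int) ≠ 0 then 1 else 0)
    = PySem.Int.floordiv ((L : Int) + (K : Int) - 1) (K : Int) := by
  rw [show (L : Int) + (K : Int) - 1 = ((L + K - 1 : Nat) : Int) from by omega,
      PySem.Int.floordiv_natCast, PySem.Int.floordiv_natCast, PySem.Int.mod_natCast,
      gfd_ceil_div L K hK]
  by_cases hr : L % K = 0
  · simp [hr]
  · simp [hr]
    omega

-- A's case-2 loop, as a function of how many iterations have run
def gfdA2 (ct k : List Char) (m : Nat) : List Char :=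
  (List.range m).foldl (fun acc (i : Nat) =>
    match PySem.List.pyGet? ct (i : Int), PySem.List.pyGet? acc (i : Int) with
    | some c, some kc =>
        acc ++ [Char.ofNat (97 + (PySem.Int.mod ((c.toNat : Int) - (kc.toNat : Int)) 26).toNat)]
    | _, _ => acc) k


lemma gfdA2_succ (ct k : List Char) (m : Nat) :
    gfdA2 ct k (m + 1)
      = (match PySem.List.pyGet? ct (m : Int), PySem.List.pyGet? (gfdA2 ct k m) (m : Int) with
         | some c, some kc =>
             gfdA2 ct k m ++ [Char.ofNat (97 + (PySem.Int.mod ((c.toNat : Int) - (kc.toNat : Int)) 26).toNat)]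
         | _, _ => gfdA2 ct k m) := by
  unfold gfdA2
  rw [List.range_succ, List.foldl_append, List.foldl_cons, List.foldl_nil]

lemma gfdA2_len (ct k : List Char) (hk : 0 < k.length) :
    ∀ m, m ≤ ct.length → (gfdA2 ct k m).length = k.length + m := by
  intro m
  induction m with
  | zero => intro _; simp [gfdA2]
  | succ m ih =>
    intro hm
    have hm' : m < ct.length := hm
    have hlen : (gfdA2 ct k m).length = k.length + m := ih (Nat.le_of_lt hm')
    rw [gfdA2_succ, PySem.List.pyGet?_ofNat ct m hm', PySem.List.pyGet?_ofNat _ m (by omega : m < (gfdA2 ct k m).length)]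
    show ((gfdA2 ct k m) ++ [_]).length = _
    simp [hlen]
    omega

lemma gfdA2_snoc (ct k : List Char) (hk : 0 < k.length) (m : Nat) (hm : m < ct.length) :
    gfdA2 ct k (m + 1)
      = gfdA2 ct k m ++ [gfdStep (ct.getD m '\x00') ((gfdA2 ct k m).getD m '\x00')] := by
  have hlen : (gfdA2 ct k m).length = k.length + m := gfdA2_len ct k hk m (Nat.le_of_lt hm)
  rw [gfdA2_succ, PySem.List.pyGet?_ofNat ct m hm, PySem.List.pyGet?_ofNat _ m (by omega : m < (gfdA2 ct k m).length)]
  show gfdA2 ct k m ++ [_] = gfdA2 ct k m ++ [_]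
  rw [gfdStep, List.getD_eq_getElem ct '\x00' hm,
      List.getD_eq_getElem (gfdA2 ct k m) '\x00' (by omega : m < (gfdA2 ct k m).length)]

-- stability: positions already produced never change afterwards
lemma gfdA2_stable (ct k : List Char) (hk : 0 < k.length) (m m' : Nat)
    (hmm : m ≤ m') (hm' : m' ≤ ct.length) (p : Nat) (hp : p < k.length + m) :
    (gfdA2 ct k m').getD p '\x00' = (gfdA2 ct k m).getD p '\x00' := by
  induction m' with
  | zero =>
    have h0 : m = 0 := by omega
    subst h0
    rfl
  | succ m' ih =>
    rcases Nat.eq_or_lt_of_le hmm with rfl | h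
    · rfl
    · have h1 : m ≤ m' := by omega
      have h2 : m' ≤ ct.length := by omega
      rw [gfdA2_snoc ct k hk m' (by omega)]
      have hlen : (gfdA2 ct k m').length = k.length + m' := gfdA2_len ct k hk m' h2
      rw [List.getD_append _ _ _ _ (by omega)]
      exact ih h1 h2

-- the defining recurrence of A's stream, read off the finished list
lemma gfdA2_good (ct k : List Char) (hk : 0 < k.length) (n : Nat) (hn : n ≤ ct.length)
    (i : Nat) (hi : i < n) :
    (gfdA2 ct k n).getD (k.length + i) '\x00'
      = gfdStep (ct.getD i '\x00') ((gfdA2 ct k n).getD i '\x00') := by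
  have hi1 : i + 1 ≤ n := hi
  have hict : i < ct.length := by omega
  have hlen : (gfdA2 ct k i).length = k.length + i := gfdA2_len ct k hk i (by omega)
  rw [gfdA2_stable ct k hk (i + 1) n hi1 hn (k.length + i) (by omega),
      gfdA2_snoc ct k hk i hict]
  rw [show k.length + i = (gfdA2 ct k i).length + 0 from by omega,
      List.getD_append_right _ _ _ _ (by omega)]
  simp only [hlen]
  have : (gfdA2 ct k n).getD i '\x00' = (gfdA2 ct k i).getD i '\x00' := by
    rw [gfdA2_stable ct k hk i n (by omega) hn i (by omega)]
  rw [this]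
  simp

-- key prefix of A's stream
lemma gfdA2_prefix (ct k : List Char) (hk : 0 < k.length) (n : Nat) (hn : n ≤ ct.length)
    (p : Nat) (hp : p < k.length) :
    (gfdA2 ct k n).getD p '\x00' = k.getD p '\x00' := by
  rw [gfdA2_stable ct k hk 0 n (Nat.zero_le _) hn p (by omega)]
  rfl

-- running one chain: if every position of earlier chains (and of this chain up to j)
-- already holds the target value, afterwards every position of this chain does too
lemma gfdChain_go (ct k : List Char) (hk : 0 < k.length) (n : Nat) (hn : n ≤ ct.length)
    (r : Nat) (hr : r < k.length) :
    ∀ fuel j m out, fuel = n - j → j = r + k.length * m → out.length = k.length + n →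
    (∀ p, p < k.length + n →
      (p < k.length ∨ (∃ r' t, r' < r ∧ p = r' + k.length * (t + 1)) ∨
        (∃ t, p = r + k.length * (t + 1) ∧ p ≤ j)) →
      out.getD p '\x00' = (gfdA2 ct k n).getD p '\x00') →
    (gfdChain ct (k.length - 1) n out j).length = k.length + n ∧
    (∀ p, p < k.length + n →
      (p < k.length ∨ (∃ r' t, r' < r ∧ p = r' + k.length * (t + 1)) ∨
        (∃ t, p = r + k.length * (t + 1))) →
      (gfdChain ct (k.length - 1) n out j).getD p '\x00' = (gfdA2 ct k n).getD p '\x00') := by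
  intro fuel
  induction fuel using Nat.strong_induction_on with
  | _ fuel ih =>
    intro j m out hfuel hj hlen hinv
    by_cases hjn : j < n
    · -- one set, then recurse
      have hK1 : k.length - 1 + 1 = k.length := by omega
      rw [gfdChain, if_pos hjn, hK1]
      have hreadj : out.getD j '\x00' = (gfdA2 ct k n).getD j '\x00' := by
        apply hinv j (by omega)
        rcases Nat.eq_zero_or_pos m with rfl | hm
        · exact Or.inl (by omega)
        · refine Or.inr (Or.inr ⟨m - 1, ?_, le_refl _⟩)
          rw [show m - 1 + 1 = m from by omega]
          exact hj
      have hgood := gfdA2_good ct k hk n hn j hjn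
      have hsetlen : (out.set (j + k.length) (gfdStep (ct.getD j '\x00') (out.getD j '\x00'))).length = k.length + n := by
        simp [hlen]
      have hjk : j + k.length < out.length := by omega
      have := ih (n - (j + k.length)) (by omega) (j + k.length) (m + 1)
        (out.set (j + k.length) (gfdStep (ct.getD j '\x00') (out.getD j '\x00')))
        rfl (by rw [Nat.mul_succ]; omega) hsetlen ?_
      · exact this
      · intro p hp hcase
        by_cases hpj : p = j + k.length
        · subst hpj
          rw [List.getD_eq_getElem _ _ (by omega), List.getElem_set_self (h := by omega),
              hreadj, ← hgood, Nat.add_comm k.length j]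
        · have : (out.set (j + k.length) (gfdStep (ct.getD j '\x00') (out.getD j '\x00'))).getD p '\x00' = out.getD p '\x00' := by
            rcases Nat.lt_or_ge p out.length with h | h
            · rw [List.getD_eq_getElem _ _ (by simpa using h), List.getD_eq_getElem _ _ h,
                  List.getElem_set_ne (by omega)]
            · rw [List.getD_eq_default _ _ (by omega), List.getD_eq_default _ _ (by simpa using h)]
          rw [this]
          apply hinv p hp
          rcases hcase with h | h | ⟨t, hpt, hple⟩
          · exact Or.inl h
          · exact Or.inr (Or.inl h)
          · refine Or.inr (Or.inr ⟨t, hpt, ?_⟩)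
            -- p ≡ r, p ≤ j + K, p ≠ j + K ⟹ p ≤ j
            have hjke : j + k.length = r + k.length * (m + 1) := by
              rw [hj]; ring
            have htm : t + 1 ≤ m + 1 := by
              by_contra hc
              have : k.length * (m + 1) < k.length * (t + 1) :=
                (Nat.mul_lt_mul_left hk).mpr (by omega)
              omega
            have htm' : t < m := by
              rcases Nat.lt_or_ge t m with h | h
              · exact h
              · exfalso
                apply hpj
                have hteq : t = m := by omega
                rw [hpt, hteq]
                omega
            have : k.length * (t + 1) ≤ k.length * m := Nat.mul_le_mul_left _ (by omega)
            omega
    · -- chain finished: j ≥ n covers the whole chain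
      rw [gfdChain, if_neg hjn]
      refine ⟨hlen, ?_⟩
      intro p hp hcase
      apply hinv p hp
      rcases hcase with h | h | ⟨t, hpt⟩
      · exact Or.inl h
      · exact Or.inr (Or.inl h)
      · refine Or.inr (Or.inr ⟨t, hpt, ?_⟩)
        -- p < K + n and j ≥ n force p ≤ j
        have h1 : r + k.length * t < n := by
          have : k.length * (t + 1) = k.length * t + k.length := by ring
          omega
        have h2 : k.length * t < k.length * m := by omega
        have h3 : t < m := Nat.lt_of_mul_lt_mul_left h2
        have : k.length * (t + 1) ≤ k.length * m := Nat.mul_le_mul_left _ (by omega)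
        omega

-- folding the chains over r = 0 … K-1 reproduces A's stream
lemma gfdChains_fold (ct k : List Char) (hk : 0 < k.length) (n : Nat) (hn : n ≤ ct.length) :
    ∀ r, r ≤ k.length →
    ((List.range r).foldl (fun out i => gfdChain ct (k.length - 1) n out i)
        (k ++ List.replicate n '\x00')).length = k.length + n ∧
    (∀ p, p < k.length + n →
      (p < k.length ∨ (∃ r' t, r' < r ∧ p = r' + k.length * (t + 1))) →
      ((List.range r).foldl (fun out i => gfdChain ct (k.length - 1) n out i)
          (k ++ List.replicate n '\x00')).getD p '\x00'
        = (gfdA2 ct k n).getD p '\x00') := by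
  intro r
  induction r with
  | zero =>
    intro _
    constructor
    · simp
    · intro p hp hcase
      rcases hcase with h | ⟨r', t, hr', _⟩
      · simp only [List.range_zero, List.foldl_nil]
        rw [List.getD_append _ _ _ _ h, gfdA2_prefix ct k hk n hn p h]
      · omega
  | succ r ih =>
    intro hr
    have hr' : r < k.length := hr
    obtain ⟨ihlen, ihinv⟩ := ih (Nat.le_of_lt hr')
    rw [List.range_succ, List.foldl_append, List.foldl_cons, List.foldl_nil]
    have := gfdChain_go ct k hk n hn r hr' (n - r) r 0 _ rfl (by omega) ihlen ?_
    · obtain ⟨h1, h2⟩ := this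
      refine ⟨h1, ?_⟩
      intro p hp hcase
      apply h2 p hp
      rcases hcase with h | ⟨r', t, hr'', hpt⟩
      · exact Or.inl h
      · rcases Nat.lt_or_ge r' r with h | h
        · exact Or.inr (Or.inl ⟨r', t, h, hpt⟩)
        · have : r' = r := by omega
          exact Or.inr (Or.inr ⟨t, by rw [hpt, this]⟩)
    · intro p hp hcase
      apply ihinv p hp
      rcases hcase with h | h | ⟨t, hpt, hple⟩
      · exact Or.inl h
      · exact Or.inr h
      · exfalso
        have : k.length * (t + 1) = k.length * t + k.length := by ring
        omega

-- B's whole case-2 buffer equals A's stream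
lemma gfd_case2_eq (ct k : List Char) (hk : 0 < k.length) :
    (List.range k.length).foldl (fun out i => gfdChain ct (k.length - 1) (ct.length - 1) out i)
        (k ++ List.replicate (ct.length - 1) '\x00')
      = gfdA2 ct k (ct.length - 1) := by
  set n := ct.length - 1 with hn
  have hnle : n ≤ ct.length := by omega
  obtain ⟨hlen, hinv⟩ := gfdChains_fold ct k hk n hnle k.length (le_refl _)
  have hlenA : (gfdA2 ct k n).length = k.length + n := gfdA2_len ct k hk n hnle
  apply List.ext_getElem (by omega)
  intro p hp1 hp2
  have hp : p < k.length + n := by omega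
  have := hinv p hp ?_
  · rwa [List.getD_eq_getElem _ _ hp1, List.getD_eq_getElem _ _ hp2] at this
  · rcases Nat.lt_or_ge p k.length with h | h
    · exact Or.inl h
    · refine Or.inr ⟨(p - k.length) % k.length, (p - k.length) / k.length,
        Nat.mod_lt _ hk, ?_⟩
      have := Nat.div_add_mod (p - k.length) k.length
      have h2 : k.length * ((p - k.length) / k.length + 1)
          = k.length * ((p - k.length) / k.length) + k.length := by ring
      omega

-- the character A's case-3 step appends does not depend on the looked-up key character:
-- the key terms cancel modulo 26, leaving the per-character map gfdChar3
lemma gfd_char3 (c kc : Char) :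
    Char.ofNat ((PySem.Int.mod ((kc.toNat : Int) - 97 +
      (((Char.ofNat ((PySem.Int.mod (((c.toNat : Int) - 97) - ((kc.toNat : Int) - 97)) 26).toNat + 97)).toNat : Int) - 97)) 26).toNat + 97)
    = gfdChar3 c := by
  simp only [gfdChar3]
  congr 1
  have h26 : (0 : Int) < 26 := by norm_num
  simp only [PySem.Int.mod_eq_emod_of_pos h26, Char.toNat_ofNat]
  rw [if_pos]
  · omega
  · exact Or.inl (by omega)

-- A's case-3 loop produces the key followed by the per-character map
lemma gfd_loop3_eq (ct : List Char) (n : Nat) (k : List Char) (hn : n ≤ ct.length) (hk : k ≠ []) :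
    (List.range n).foldl (fun acc (i : Nat) =>
      match PySem.List.pyGet? ct (i : Int), PySem.List.pyGet? acc (i : Int) with
      | some c, some kc =>
          let osym := Char.ofNat ((PySem.Int.mod (((c.toNat : Int) - 97) - ((kc.toNat : Int) - 97)) 26).toNat + 97)
          acc ++ [Char.ofNat ((PySem.Int.mod ((kc.toNat : Int) - 97 + ((osym.toNat : Int) - 97)) 26).toNat + 97)]
      | _, _ => acc) k
    = k ++ (ct.take n).map gfdChar3 := by
  induction n with
  | zero => simp
  | succ n ih =>
    have hn' : n < ct.length := hn
    rw [List.range_succ, List.foldl_append, ih (Nat.le_of_lt hn'), List.foldl_cons, List.foldl_nil]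
    have hlen : n < (k ++ (ct.take n).map gfdChar3).length := by
      have := List.length_pos_of_ne_nil hk
      rw [List.length_append, List.length_map, List.length_take_of_le (Nat.le_of_lt hn')]
      omega
    rw [PySem.List.pyGet?_ofNat ct n hn', PySem.List.pyGet?_ofNat _ n hlen]
    simp only []
    rw [gfd_char3, List.take_add_one, List.getElem?_eq_getElem hn']
    simp only [Option.toList_some, List.map_append, List.map_cons, List.map_nil, List.append_assoc]

-- ===== VERDICT (by name: the statement is the Claim_ definition above) =====
theorem gamma_forming_decrypt_spec : Claim_equal_gamma_forming_decrypt := by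
  intro close_text key encryption_type _ hpre
  unfold Spec_gamma_forming_decrypt gamma_forming_decrypt gamma_forming_decrypt_alt
  obtain ⟨ht, hkey⟩ := hpre
  have hklist : key ≠ "" → key.toList ≠ [] := by
    intro h h'
    exact h (by simpa using congrArg String.ofList h')
  rcases ht with rfl | rfl | rfl
  · simp only [reduceIte]
    have hk : key.toList ≠ [] := hklist (by rcases hkey with h | ⟨h, _⟩ <;> simp_all)
    have hK : 0 < key.toList.length := List.length_pos_of_ne_nil hk
    rw [gfd_count_eq close_text.toList.length key.toList.length hK]
  · simp only [reduceIte]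
    by_cases hk : key.toList = []
    · have hct : close_text.toList.length ≤ 1 := by
        rcases hkey with h | ⟨_, h⟩
        · exact absurd hk (hklist h)
        · exact h
      have h0 : close_text.toList.length - 1 = 0 := by omega
      rw [h0]
      simp [hk]
    · have hK : 0 < key.toList.length := List.length_pos_of_ne_nil hk
      rw [show (List.range (close_text.toList.length - 1)).foldl _ key.toList
            = gfdA2 close_text.toList key.toList (close_text.toList.length - 1) from rfl,
          ← gfd_case2_eq close_text.toList key.toList hK]
      norm_num
  · simp only [reduceIte]
    rw [PySem.List.slice_to_neg_one, List.dropLast_eq_take]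
    by_cases hk : key.toList = []
    · have hct : close_text.toList.length ≤ 1 := by
        rcases hkey with h | ⟨_, h⟩
        · exact absurd hk (hklist h)
        · exact h
      have : close_text.toList.length - 1 = 0 := by omega
      rw [this]
      simp [hk]
    · exact congrArg String.ofList
        (gfd_loop3_eq close_text.toList (close_text.toList.length - 1) key.toList (Nat.sub_le _ _) hk)
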